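-- pv_equiv track=rewrite | github.com/kibrnew/computative-kb | 1968-array-with-elements-not-equal-to-average-of-neighbors/1968-array-with-elements-not-equal-to-average-of-neighbors.py | rearrangeArray
-- ===== SOURCE A (Python) =====
-- from typing import List
--
-- def rearrangeArray(nums: List[int]) -> List[int]:
--     nums.sort()
--     ans=[]
--     pr1=0
--     pr2=len(nums)-1
--     while pr1<=pr2:
--         ans.append(nums[pr1])
--         if pr1==pr2:
--             break
--         pr1+=1
--         ans.append(nums[pr2])
--         pr2-=1
--     return ans
-- ===== SOURCE B (Python) =====
-- from typing import List
--
-- def rearrangeArray(nums: List[int]) -> List[int]: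
--     nums.sort()
--     half = (len(nums) + 1) // 2
--     low = nums[:half]
--     high = nums[half:]
--     high.reverse()
--     out = []
--     for a, b in zip(low, high):
--         out.append(a)
--         out.append(b)
--     if len(high) < len(low):
--         out.append(low[-1])
--     return out
-- ===== Notes on version B (the rewrite author's own statement) =====
-- stated objective: alternative
-- what changed: Replaces A's converging two-pointer while-loop (with the pr1==pr2 break) by staged passes: split the sorted list into its low and high halves, reverse the high half, zip the halves together, and append the odd middle leftover.
import Mathlib
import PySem

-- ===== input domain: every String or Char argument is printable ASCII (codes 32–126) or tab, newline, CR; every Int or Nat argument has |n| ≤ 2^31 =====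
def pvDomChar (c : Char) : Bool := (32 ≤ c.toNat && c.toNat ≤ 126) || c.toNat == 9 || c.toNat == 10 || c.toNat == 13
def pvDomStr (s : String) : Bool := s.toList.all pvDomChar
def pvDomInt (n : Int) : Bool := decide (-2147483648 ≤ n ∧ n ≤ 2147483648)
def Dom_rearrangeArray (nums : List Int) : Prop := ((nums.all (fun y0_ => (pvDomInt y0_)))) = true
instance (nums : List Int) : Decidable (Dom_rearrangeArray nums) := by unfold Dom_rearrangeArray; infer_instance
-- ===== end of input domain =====

-- B sorts, splits the sorted list into its low and high halves, reverses the high half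
-- and zips the two halves together; A walks two converging pointers.
-- Both Pythons sort the argument in place; the equivalence proved here is about the return value.

-- ===== PORT A =====
-- A's while-loop; indices are always in range, so pyGetD's default 0 is never returned.
def pvLoopA (s ans : List Int) (pr1 pr2 : Int) : List Int :=
  if _h : pr1 ≤ pr2 then
    let ans1 := ans ++ [PySem.List.pyGetD s pr1 0]
    if pr1 = pr2 then ans1
    else pvLoopA s (ans1 ++ [PySem.List.pyGetD s pr2 0]) (pr1 + 1) (pr2 - 1)
  else ans
termination_by (pr2 + 1 - pr1).toNat
decreasing_by omega

def rearrangeArray (nums : List Int) : List Int :=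
  let s := PySem.List.sorted nums (fun x => x) false
  pvLoopA s [] 0 ((s.length : Int) - 1)

-- ===== PORT B =====
-- B's body after the sort: halves, reverse, zip loop, odd leftover.
def pvZipHalves (s : List Int) : List Int :=
  let half := PySem.Int.floordiv ((s.length : Int) + 1) 2
  let low := PySem.List.slice s none (some half)
  let high := (PySem.List.slice s (some half) none).reverse
  let out := (low.zip high).foldl (fun acc p => acc ++ [p.1, p.2]) ([] : List Int)
  if high.length < low.length then out ++ [PySem.List.pyGetD low (-1) 0] else out

def rearrangeArray_alt (nums : List Int) : List Int :=
  pvZipHalves (PySem.List.sorted nums (fun x => x) false)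

-- ===== PRECONDITION & SPEC =====
def Spec_rearrangeArray (nums : List Int) (out : List Int) : Prop := out = rearrangeArray_alt nums
instance (nums : List Int) (out : List Int) : Decidable (Spec_rearrangeArray nums out) := by unfold Spec_rearrangeArray; infer_instance

-- ===== CLAIM (what is proved, stated in full; the proofs are below) =====
def Claim_equal_rearrangeArray : Prop := ∀ (nums : List Int), Dom_rearrangeArray nums → Spec_rearrangeArray nums (rearrangeArray nums)

-- ===== LEMMAS AND PROOFS =====

-- Normal form both ports are reduced to: the j-th output is s[j//2] (even j) / s[n-1-j//2] (odd j).
def pvIdx (s : List Int) : List Int :=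
  (PySem.List.pyRange 0 (s.length : Int) 1).map (fun j =>
    if PySem.Int.mod j 2 = 0 then PySem.List.pyGetD s (PySem.Int.floordiv j 2) 0
    else PySem.List.pyGetD s ((s.length : Int) - 1 - PySem.Int.floordiv j 2) 0)

theorem pv_mod_shift (j : Int) : PySem.Int.mod (2 + j) 2 = PySem.Int.mod j 2 := by
  rw [PySem.Int.mod_eq_emod_of_pos (show (0:Int) < 2 by norm_num),
     PySem.Int.mod_eq_emod_of_pos (show (0:Int) < 2 by norm_num)]
  omega

theorem pv_fd_shift (j : Int) : PySem.Int.floordiv (2 + j) 2 = 1 + PySem.Int.floordiv j 2 := by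
  rw [PySem.Int.floordiv_eq_ediv_of_pos (show (0:Int) < 2 by norm_num),
     PySem.Int.floordiv_eq_ediv_of_pos (show (0:Int) < 2 by norm_num)]
  omega

theorem pv_fd_natCast (j : Nat) : PySem.Int.floordiv (j : Int) 2 = ((j / 2 : Nat) : Int) := by
  rw [PySem.Int.floordiv_eq_ediv_of_pos (show (0:Int) < 2 by norm_num)]
  omega

-- A's loop produces exactly the index-formula segment for the window [a, b].
theorem pvLoopA_eq (s : List Int) :
    ∀ (k : Nat) (a b : Int) (ans : List Int), (b + 1 - a).toNat = k →
    pvLoopA s ans a b = ans ++ (PySem.List.pyRange 0 (b + 1 - a) 1).map (fun j =>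
      if PySem.Int.mod j 2 = 0 then PySem.List.pyGetD s (a + PySem.Int.floordiv j 2) 0
      else PySem.List.pyGetD s (b - PySem.Int.floordiv j 2) 0) := by
  intro k
  induction k using Nat.strong_induction_on with
  | _ k ih =>
    intro a b ans hk
    rw [pvLoopA]
    by_cases hab : a ≤ b
    · simp only [hab, dite_true]
      by_cases heq : a = b
      · subst heq
        have h1 : a + 1 - a = 1 := by ring
        rw [if_pos rfl, h1]
        rw [PySem.List.pyRange_one_cons (show (0:Int) < 1 by norm_num),
            PySem.List.pyRange_one_eq_nil (by norm_num)]
        have hm0 : PySem.Int.mod 0 2 = 0 := by decide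
        have hf0 : PySem.Int.floordiv 0 2 = 0 := by decide
        simp
      · rw [if_neg heq]
        rw [ih ((b - 1) + 1 - (a + 1)).toNat (by omega) (a + 1) (b - 1) _ rfl]
        have hsplit : PySem.List.pyRange 0 (b + 1 - a) 1 =
            0 :: 1 :: PySem.List.pyRange 2 (b + 1 - a) 1 := by
          rw [PySem.List.pyRange_one_cons (by omega), PySem.List.pyRange_one_cons (by omega)]
          norm_num
        rw [hsplit]
        simp only [List.map_cons, List.append_assoc, List.cons_append, List.nil_append]
        have hm0 : PySem.Int.mod 0 2 = 0 := by decide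
        have hm1 : PySem.Int.mod 1 2 = 1 := by decide
        have hf0 : PySem.Int.floordiv 0 2 = 0 := by decide
        rw [hm0, hf0, hm1]
        have hf1 : PySem.Int.floordiv 1 2 = 0 := by decide
        rw [hf1]
        simp only [if_neg (by norm_num : (1 : Int) ≠ 0), add_zero, sub_zero]
        congr 1
        have e1 : (b - 1) + 1 - (a + 1) = b + 1 - a - 2 := by ring
        rw [e1, PySem.List.pyRange_one 0 (b + 1 - a - 2), PySem.List.pyRange_one 2 (b + 1 - a),
            List.map_map, List.map_map]
        rw [show (b + 1 - a - 2 - 0).toNat = (b + 1 - a - 2).toNat by omega]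
        simp only [if_true]
        congr 2
        apply List.map_congr_left
        intro j _
        simp only [Function.comp_apply, zero_add, pv_mod_shift, pv_fd_shift]
        by_cases hj : PySem.Int.mod (j : Int) 2 = 0
        · rw [if_pos hj, if_pos hj]; congr 1; ring
        · rw [if_neg hj, if_neg hj]; congr 1; ring
    · simp only [hab, dite_false]
      rw [PySem.List.pyRange_one_eq_nil (by omega)]
      simp

theorem pv_getD_single (x : Int) : PySem.List.pyGetD [x] (-1) 0 = x := by
  simp [PySem.List.pyGetD, PySem.List.pyGet?_neg_one]

theorem pv_getD_last (x h : Int) (t : List Int) :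
    PySem.List.pyGetD (x :: h :: t) (-1) 0 = PySem.List.pyGetD (h :: t) (-1) 0 := by
  simp [PySem.List.pyGetD, PySem.List.pyGet?_neg_one, List.getLast?_cons_cons]

-- B's body in take/drop form.
theorem pvZipHalves_eq_takeDrop (s : List Int) :
    pvZipHalves s =
      ((s.take ((s.length + 1) / 2)).zip ((s.drop ((s.length + 1) / 2)).reverse)).flatMap
          (fun p => [p.1, p.2]) ++
        (if ((s.drop ((s.length + 1) / 2)).reverse).length < (s.take ((s.length + 1) / 2)).length
         then [PySem.List.pyGetD (s.take ((s.length + 1) / 2)) (-1) 0] else []) := by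
  unfold pvZipHalves
  have hhalf : PySem.Int.floordiv ((s.length : Int) + 1) 2 = (((s.length + 1) / 2 : Nat) : Int) := by
    rw [show ((s.length : Int) + 1) = ((s.length + 1 : Nat) : Int) by push_cast; ring, pv_fd_natCast]
  simp only [hhalf, PySem.List.slice_to_natCast, PySem.List.slice_from_natCast,
      PySem.List.foldl_append_eq_flatMap]
  split_ifs <;> simp

-- pvIdx on a two-ended decomposition peels the first and last element.
theorem pvIdx_step (x y : Int) (m : List Int) :
    pvIdx (x :: (m ++ [y])) = x :: y :: pvIdx m := by
  unfold pvIdx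
  have hn : ((x :: (m ++ [y])).length : Int) = (m.length : Int) + 2 := by simp; push_cast; ring
  rw [hn]
  have hsplit : PySem.List.pyRange 0 ((m.length : Int) + 2) 1 =
      0 :: 1 :: PySem.List.pyRange 2 ((m.length : Int) + 2) 1 := by
    rw [PySem.List.pyRange_one_cons (by omega), PySem.List.pyRange_one_cons (by omega)]
    norm_num
  rw [hsplit]
  simp only [List.map_cons]
  have hm0 : PySem.Int.mod 0 2 = 0 := by decide
  have hm1 : PySem.Int.mod 1 2 = 1 := by decide
  have hf0 : PySem.Int.floordiv 0 2 = 0 := by decide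
  have hf1 : PySem.Int.floordiv 1 2 = 0 := by decide
  rw [hm0, hf0, hm1, hf1]
  simp only [if_pos rfl, if_neg (by norm_num : (1 : Int) ≠ 0)]
  have hx : PySem.List.pyGetD (x :: (m ++ [y])) 0 0 = x := PySem.List.pyGetD_zero_cons x (m ++ [y]) 0
  have hyidx : (m.length : Int) + 2 - 1 - 0 = (((x :: m).length : Nat) : Int) := by simp; push_cast; ring
  have hy : PySem.List.pyGetD (x :: (m ++ [y])) ((m.length : Int) + 2 - 1 - 0) 0 = y := by
    rw [hyidx, PySem.List.pyGetD_natCast]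
    have : (x :: (m ++ [y])) = (x :: m) ++ [y] := by simp
    rw [this]
    simp [List.getD, List.getElem?_append_right]
  rw [hx, hy]
  congr 1
  congr 1
  -- tail: shift the range by 2 and drop x, y from the indexing
  rw [PySem.List.pyRange_one 2 ((m.length : Int) + 2), PySem.List.pyRange_one 0 (m.length : Int),
      List.map_map, List.map_map]
  rw [show ((m.length : Int) + 2 - 2).toNat = m.length by omega,
      show ((m.length : Int) - 0).toNat = m.length by omega]
  apply List.map_congr_left
  intro j hj
  rw [List.mem_range] at hj
  simp only [Function.comp_apply, zero_add, pv_mod_shift, pv_fd_shift, pv_fd_natCast]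
  by_cases hpar : PySem.Int.mod (j : Int) 2 = 0
  · rw [if_pos hpar, if_pos hpar]
    have h1 : (1 : Int) + ((j / 2 : Nat) : Int) = (((j / 2 + 1 : Nat) : Nat) : Int) := by push_cast; ring
    rw [h1, PySem.List.pyGetD_natCast, PySem.List.pyGetD_natCast]
    have hlt : j / 2 < m.length := by omega
    simp [List.getD, List.getElem?_cons_succ, List.getElem?_append_left, hlt,
          List.getElem?_eq_getElem]
  · rw [if_neg hpar, if_neg hpar]
    have hi : (m.length : Int) + 2 - 1 - (1 + ((j / 2 : Nat) : Int)) = (((m.length - j / 2 : Nat) : Nat) : Int) := by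
      have : j / 2 < m.length := by omega
      push_cast; omega
    have hi' : (m.length : Int) - 1 - ((j / 2 : Nat) : Int) = (((m.length - 1 - j / 2 : Nat) : Nat) : Int) := by
      have : j / 2 < m.length := by omega
      push_cast; omega
    rw [hi, hi', PySem.List.pyGetD_natCast, PySem.List.pyGetD_natCast]
    have h2 : j / 2 < m.length := by omega
    have h3 : m.length - j / 2 = (m.length - 1 - j / 2) + 1 := by omega
    rw [h3]
    have h4 : m.length - 1 - j / 2 < m.length := by omega
    simp [List.getD, List.getElem?_cons_succ, List.getElem?_append_left, h4,
          List.getElem?_eq_getElem]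

-- B's zip-of-halves also peels the first and last element.
theorem pvZipHalves_step (x y : Int) (m : List Int) :
    pvZipHalves (x :: (m ++ [y])) = x :: y :: pvZipHalves m := by
  rw [pvZipHalves_eq_takeDrop, pvZipHalves_eq_takeDrop]
  set k := m.length with hk
  have hlen : (x :: (m ++ [y])).length = k + 2 := by simp [hk]
  have hh : (k + 2 + 1) / 2 = (k + 1) / 2 + 1 := by omega
  have hle : (k + 1) / 2 ≤ k := by omega
  rw [hlen, hh]
  have htake : (x :: (m ++ [y])).take ((k + 1) / 2 + 1) = x :: m.take ((k + 1) / 2) := by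
    simp [List.take_cons, List.take_append_of_le_length hle]
  have hdrop : (x :: (m ++ [y])).drop ((k + 1) / 2 + 1) = m.drop ((k + 1) / 2) ++ [y] := by
    simp [List.drop_cons, List.drop_append_of_le_length hle]
  rw [htake, hdrop]
  simp only [List.reverse_append, List.reverse_singleton, List.singleton_append,
             List.zip_cons_cons, List.flatMap_cons]
  have hlt : (m.drop ((k + 1) / 2)).reverse.length = k - (k + 1) / 2 := by simp [hk]
  have hlt2 : ((m.drop ((k + 1) / 2)).reverse ).length + 1 = (k - (k + 1) / 2) + 1 := by omega
  have hcond : ((y :: (m.drop ((k + 1) / 2)).reverse).length < (x :: m.take ((k + 1) / 2)).length)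
      ↔ ((m.drop ((k + 1) / 2)).reverse.length < (m.take ((k + 1) / 2)).length) := by
    simp only [List.length_cons]
    omega
  by_cases hc : (m.drop ((k + 1) / 2)).reverse.length < (m.take ((k + 1) / 2)).length
  · rw [if_pos (hcond.mpr hc), if_pos hc]
    have hne : m.take ((k + 1) / 2) ≠ [] := by
      intro h
      rw [h] at hc
      simp at hc
    obtain ⟨h0, t0, hd⟩ := List.exists_cons_of_ne_nil hne
    have hgl : PySem.List.pyGetD (x :: m.take ((k + 1) / 2)) (-1) 0
        = PySem.List.pyGetD (m.take ((k + 1) / 2)) (-1) 0 := by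
      rw [hd]; exact pv_getD_last x h0 t0
    rw [hgl]
    simp
  · rw [if_neg (fun h => hc (hcond.mp h)), if_neg hc]
    simp

-- Main lemma: B's zip-of-halves equals the index-formula normal form.
theorem pvZipHalves_eq_idx (s : List Int) : pvZipHalves s = pvIdx s := by
  generalize hN : s.length = N
  induction N using Nat.strong_induction_on generalizing s with
  | _ N ih =>
    match s, hN with
    | [], _ => decide
    | x :: t, hN =>
      rcases List.eq_nil_or_concat t with rfl | ⟨m, y, rfl⟩
      · rw [pvZipHalves_eq_takeDrop]
        unfold pvIdx
        norm_num
        rw [PySem.List.pyRange_one_cons (by norm_num), PySem.List.pyRange_one_eq_nil (by norm_num)]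
        have hm0 : PySem.Int.mod 0 2 = 0 := by decide
        have hf0 : PySem.Int.floordiv 0 2 = 0 := by decide
        simp [hm0, hf0, PySem.List.pyGetD_zero_cons, pv_getD_single]
      · rw [List.concat_eq_append] at hN ⊢
        rw [pvZipHalves_step, pvIdx_step,
            ih m.length (by simp at hN; omega) m rfl]

-- ===== VERDICT (by name: the statement is the Claim_ definition above) =====
theorem rearrangeArray_spec : Claim_equal_rearrangeArray := by
  intro nums _
  unfold Spec_rearrangeArray rearrangeArray rearrangeArray_alt
  simp only []
  rw [pvLoopA_eq _ _ 0 _ [] rfl, pvZipHalves_eq_idx]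
  unfold pvIdx
  simp only [List.nil_append]
  have h1 : ((PySem.List.sorted nums (fun x => x) false).length : Int) - 1 + 1 - 0 =
      ((PySem.List.sorted nums (fun x => x) false).length : Int) := by ring
  rw [h1]
  apply List.map_congr_left
  intro j _
  by_cases hj : PySem.Int.mod j 2 = 0
  · rw [if_pos hj, if_pos hj]; congr 1; ring
  · rw [if_neg hj, if_neg hj]
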